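-- pv_equiv track=rewrite | github.com/andrevzs/RA2-19 | arvore_assembly.py | _extrair_argumentos
-- ===== SOURCE A (Python) =====
-- def _extrair_argumentos(tokens_comando):
--     """
--     Recebe um comando completo '(CMD ...)' e retorna os argumentos de nível superior.
--     """
--     if len(tokens_comando) < 3 or tokens_comando[0] != "(" or tokens_comando[-1] != ")":
--         raise ValueError(f"Comando inválido: {tokens_comando}")
--
--     internos = [str(t) for t in tokens_comando[2:-1]]
--     args = []
--     i = 0
--
--     while i < len(internos):
--         token = internos[i]
--
--         if token == "(":
--             inicio = i
--             nivel = 1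
--             i += 1
--             while i < len(internos) and nivel > 0:
--                 if internos[i] == "(":
--                     nivel += 1
--                 elif internos[i] == ")":
--                     nivel -= 1
--                 i += 1
--
--             if nivel != 0:
--                 raise ValueError(f"Parênteses desbalanceados em comando: {tokens_comando}")
--
--             args.append(internos[inicio:i])
--             continue
--
--         args.append([token])
--         i += 1
--
--     return args
-- ===== SOURCE B (Python) =====
-- def _extrair_argumentos(tokens_comando):
--     """
--     Recebe um comando completo '(CMD ...)' e retorna os argumentos de nível superior.
--     Two-pass version: first build a dict matching each '(' index to its ')' index
--     with a stack, then emit top-level arguments by jumping over whole groups.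
--     """
--     if len(tokens_comando) < 3 or tokens_comando[0] != "(" or tokens_comando[-1] != ")":
--         raise ValueError(f"Comando inválido: {tokens_comando}")
--
--     internos = [str(t) for t in tokens_comando[2:-1]]
--
--     stack = []
--     match = {}
--     for idx, t in enumerate(internos):
--         if t == "(":
--             stack.append(idx)
--         elif t == ")" and stack:
--             match[stack.pop()] = idx
--
--     if stack:
--         raise ValueError(f"Parênteses desbalanceados em comando: {tokens_comando}")
--
--     args = []
--     i = 0
--     n = len(internos)
--     while i < n:
--         if internos[i] == "(":
--             j = match[i]
--             args.append(internos[i:j + 1])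
--             i = j + 1
--         else:
--             args.append([internos[i]])
--             i += 1
--     return args
-- ===== Notes on version B (the rewrite author's own statement) =====
-- stated objective: alternative
-- what changed: Replaces A's nested scan (outer index walk with an inner depth-counting loop per group) by two passes: a stack pass that records every '(' index's matching ')' index in a dict, then a top-level walk that jumps straight to each recorded match.
import Mathlib
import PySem

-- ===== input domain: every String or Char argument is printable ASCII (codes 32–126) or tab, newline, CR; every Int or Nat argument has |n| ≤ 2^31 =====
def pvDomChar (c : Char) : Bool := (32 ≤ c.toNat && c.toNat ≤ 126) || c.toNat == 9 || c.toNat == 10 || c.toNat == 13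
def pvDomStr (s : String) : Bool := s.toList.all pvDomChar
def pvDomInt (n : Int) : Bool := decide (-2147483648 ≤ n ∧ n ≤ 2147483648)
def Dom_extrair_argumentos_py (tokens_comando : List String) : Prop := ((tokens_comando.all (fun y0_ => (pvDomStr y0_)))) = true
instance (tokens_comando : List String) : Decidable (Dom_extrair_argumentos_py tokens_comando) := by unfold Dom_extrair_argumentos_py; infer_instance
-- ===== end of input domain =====

-- B replaces A's nested scan by a stack pass recording each '(' index's matching ')' in a dict,
-- then a top-level walk jumping over whole groups (alternative algorithm, same cost).


-- ===== PORT A =====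
-- inner `while i < len(internos) and nivel > 0` loop: returns (consumed tokens, remaining
-- suffix, final nivel); the consumed tokens are exactly internos[inicio+1:i].
def pvAInner : List String → Int → List String × List String × Int
  | l, nivel =>
    if 0 < nivel then
      match l with
      | [] => ([], [], nivel)
      | t :: rest =>
        let nivel' := if t = "(" then nivel + 1 else if t = ")" then nivel - 1 else nivel
        let res := pvAInner rest nivel'
        (t :: res.1, res.2.1, res.2.2)
    else ([], l, nivel)

theorem pvAInner_rest_le (l : List String) (n : Int) : (pvAInner l n).2.1.length ≤ l.length := by
  induction l generalizing n with
  | nil => unfold pvAInner; split <;> simp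
  | cons t rest ih =>
    unfold pvAInner
    split
    · exact Nat.le_succ_of_le (ih _)
    · simp

-- outer `while i < len(internos)` loop of A, on the suffix of internos from i.
def pvAMain : List String → List (List String)
  | [] => []
  | t :: rest =>
    if t = "(" then
      let res := pvAInner rest 1
      if res.2.2 ≠ 0 then []  -- Python: raise ValueError("Parênteses desbalanceados…"); outside Pre_
      else (t :: res.1) :: pvAMain res.2.1
    else [t] :: pvAMain rest
termination_by l => l.length
decreasing_by
  · exact Nat.lt_succ_of_le (pvAInner_rest_le rest 1)
  · simp

-- `[str(t) for t in tokens_comando[2:-1]]` on a list of str is the slice itself.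
def extrair_argumentos_py (tokens_comando : List String) : List (List String) :=
  if tokens_comando.length < 3 ∨ ¬ (PySem.List.pyGet? tokens_comando 0 = some "(")
      ∨ ¬ (PySem.List.pyGet? tokens_comando (-1) = some ")") then []  -- raise ValueError("Comando inválido…"); outside Pre_
  else pvAMain (PySem.List.slice tokens_comando (some 2) (some (-1)))

-- ===== PORT B =====
-- first pass of Source B: `for idx, t in enumerate(internos)` with a stack (head = top) and the match dict.
def pvBMatch : List (Int × String) → List Int → PySem.Dict Int Int → List Int × PySem.Dict Int Int
  | [], stack, m => (stack, m)
  | (idx, t) :: rest, stack, m =>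
    if t = "(" then pvBMatch rest (idx :: stack) m
    else if t = ")" then
      match stack with
      | p :: s => pvBMatch rest s (m.insert p idx)
      | [] => pvBMatch rest stack m
    else pvBMatch rest stack m

-- second pass of Source B: `while i < n`, jumping to match[i] + 1 on a '('.
-- fuel = number of remaining positions; i advances by ≥ 1 per iteration, so len(internos) is enough.
def pvBWalk (internos : List String) (m : PySem.Dict Int Int) : Nat → Int → List (List String)
  | 0, _ => []
  | fuel + 1, i =>
    if i < (internos.length : Int) then
      match PySem.List.pyGet? internos i with
      | some t =>
        if t = "(" then
          match m.get? i with
          | some j => PySem.List.slice internos (some i) (some (j + 1)) :: pvBWalk internos m fuel (j + 1)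
          | none => []  -- KeyError; unreachable after the empty-stack check
        else [t] :: pvBWalk internos m fuel (i + 1)
      | none => []  -- unreachable: 0 ≤ i < len(internos)
    else []

def extrair_argumentos_py_alt (tokens_comando : List String) : List (List String) :=
  if tokens_comando.length < 3 ∨ ¬ (PySem.List.pyGet? tokens_comando 0 = some "(")
      ∨ ¬ (PySem.List.pyGet? tokens_comando (-1) = some ")") then []  -- raise ValueError("Comando inválido…"); outside Pre_
  else
    let internos := PySem.List.slice tokens_comando (some 2) (some (-1))
    let res := pvBMatch (PySem.List.enumerate internos 0) [] PySem.Dict.empty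
    if res.1 ≠ [] then []  -- Python: raise ValueError("Parênteses desbalanceados…"); outside Pre_
    else pvBWalk internos res.2 internos.length 0

-- ===== PRECONDITION & SPEC =====
-- one step of the clamped-depth count: '(' opens, ')' closes one level if any (a stray
-- top-level ')' is an ordinary token for A, hence the clamp at 0 via Nat subtraction).
def pvStep (d : Nat) (t : String) : Nat := if t = "(" then d + 1 else if t = ")" then d - 1 else d

def pvClampDepth (l : List String) : Nat := l.foldl pvStep 0

-- Pre_ = exactly the inputs where A returns: the '(CMD … )' shape check passes and no
-- top-level '(' in tokens[2:-1] is left unclosed (clamped depth ends at 0).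
def Pre_extrair_argumentos_py (tokens_comando : List String) : Prop :=
  3 ≤ tokens_comando.length ∧ PySem.List.pyGet? tokens_comando 0 = some "("
    ∧ PySem.List.pyGet? tokens_comando (-1) = some ")"
    ∧ pvClampDepth (PySem.List.slice tokens_comando (some 2) (some (-1))) = 0
instance (tokens_comando : List String) : Decidable (Pre_extrair_argumentos_py tokens_comando) := by
  unfold Pre_extrair_argumentos_py; infer_instance

def pvWitness_extrair_argumentos_py : List String := ["(", "f", "x", "(", "y", ")", ")"]

def Spec_extrair_argumentos_py (tokens_comando : List String) (out : List (List String)) : Prop := out = extrair_argumentos_py_alt tokens_comando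
instance (tokens_comando : List String) (out : List (List String)) : Decidable (Spec_extrair_argumentos_py tokens_comando out) := by unfold Spec_extrair_argumentos_py; infer_instance

-- ===== CLAIM (what is proved, stated in full; the proofs are below) =====
def Claim_equal_extrair_argumentos_py : Prop := ∀ (tokens_comando : List String), Dom_extrair_argumentos_py tokens_comando → Pre_extrair_argumentos_py tokens_comando → Spec_extrair_argumentos_py tokens_comando (extrair_argumentos_py tokens_comando)

-- ===== LEMMAS AND PROOFS =====

theorem pvAInner_nil (n : Int) : pvAInner [] n = ([], [], n) := by
  unfold pvAInner; split <;> rfl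

theorem pvAInner_nonpos {n : Int} (h : ¬ 0 < n) (l : List String) : pvAInner l n = ([], l, n) := by
  unfold pvAInner; split
  · omega
  · rfl

theorem pvAInner_cons {n : Int} (h : 0 < n) (t : String) (rest : List String) :
    pvAInner (t :: rest) n =
      ((t :: (pvAInner rest (if t = "(" then n + 1 else if t = ")" then n - 1 else n)).1,
        (pvAInner rest (if t = "(" then n + 1 else if t = ")" then n - 1 else n)).2.1,
        (pvAInner rest (if t = "(" then n + 1 else if t = ")" then n - 1 else n)).2.2)) := by
  conv_lhs => unfold pvAInner
  simp [h]

theorem pvAInner_split (l : List String) (n : Int) (hn : 0 < n) :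
    l = (pvAInner l n).1 ++ (pvAInner l n).2.1 ∧
      (((pvAInner l n).2.2 = 0 ∧ List.foldl pvStep n.toNat (pvAInner l n).1 = 0)
        ∨ ((pvAInner l n).2.1 = [] ∧ 0 < (pvAInner l n).2.2
            ∧ List.foldl pvStep n.toNat l = (pvAInner l n).2.2.toNat)) := by
  induction l generalizing n with
  | nil =>
    rw [pvAInner_nil]
    exact ⟨rfl, Or.inr ⟨rfl, hn, rfl⟩⟩
  | cons t rest ih =>
    rw [pvAInner_cons hn]
    by_cases h1 : t = "("
    · subst h1
      rw [if_pos rfl]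
      obtain ⟨hs, hc⟩ := ih (n + 1) (by omega)
      have hstep : pvStep n.toNat "(" = (n + 1).toNat := by simp [pvStep]; omega
      refine ⟨by rw [List.cons_append, ← hs], ?_⟩
      rcases hc with ⟨h0, hf⟩ | ⟨hr, hpos, hf⟩
      · exact Or.inl ⟨h0, by rw [List.foldl_cons, hstep, hf]⟩
      · exact Or.inr ⟨hr, hpos, by rw [List.foldl_cons, hstep, hf]⟩
    · by_cases h2 : t = ")"
      · subst h2
        rw [if_neg h1, if_pos rfl]
        have hstep : pvStep n.toNat ")" = (n - 1).toNat := by simp [pvStep, h1]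
        by_cases h3 : n = 1
        · subst h3
          rw [pvAInner_nonpos (by omega)]
          refine ⟨rfl, Or.inl ⟨rfl, ?_⟩⟩
          simp [pvStep, h1]
        · obtain ⟨hs, hc⟩ := ih (n - 1) (by omega)
          refine ⟨by rw [List.cons_append, ← hs], ?_⟩
          rcases hc with ⟨h0, hf⟩ | ⟨hr, hpos, hf⟩
          · exact Or.inl ⟨h0, by rw [List.foldl_cons, hstep, hf]⟩
          · exact Or.inr ⟨hr, hpos, by rw [List.foldl_cons, hstep, hf]⟩
      · rw [if_neg h1, if_neg h2]
        have hstep : pvStep n.toNat t = n.toNat := by simp [pvStep, h1, h2]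
        obtain ⟨hs, hc⟩ := ih n hn
        refine ⟨by rw [List.cons_append, ← hs], ?_⟩
        rcases hc with ⟨h0, hf⟩ | ⟨hr, hpos, hf⟩
        · exact Or.inl ⟨h0, by rw [List.foldl_cons, hstep, hf]⟩
        · exact Or.inr ⟨hr, hpos, by rw [List.foldl_cons, hstep, hf]⟩

theorem pvBMatch_append (e1 e2 : List (Int × String)) (s : List Int) (d : PySem.Dict Int Int) :
    pvBMatch (e1 ++ e2) s d = pvBMatch e2 (pvBMatch e1 s d).1 (pvBMatch e1 s d).2 := by
  induction e1 generalizing s d with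
  | nil => simp [pvBMatch]
  | cons e rest ih =>
    obtain ⟨idx, t⟩ := e
    simp only [List.cons_append, pvBMatch]
    by_cases h1 : t = "("
    · simp only [if_pos h1]; exact ih _ _
    · by_cases h2 : t = ")"
      · simp only [if_neg h1, if_pos h2]
        cases s with
        | nil => exact ih _ _
        | cons p s' => exact ih _ _
      · simp only [if_neg h1, if_neg h2]; exact ih _ _

theorem pvBMatch_stack_len (u : List String) (k : Int) (s : List Int) (d : PySem.Dict Int Int) :
    (pvBMatch (PySem.List.enumerate u k) s d).1.length = List.foldl pvStep s.length u := by
  induction u generalizing k s d with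
  | nil => simp [PySem.List.enumerate_nil, pvBMatch]
  | cons t rest ih =>
    rw [PySem.List.enumerate_cons]
    simp only [pvBMatch, List.foldl_cons, pvStep]
    by_cases h1 : t = "("
    · simp only [if_pos h1]; exact ih _ _ _
    · by_cases h2 : t = ")"
      · simp only [if_neg h1, if_pos h2]
        cases s with
        | nil => rw [ih]; simp
        | cons p s' => rw [ih]; simp
      · simp only [if_neg h1, if_neg h2]; exact ih _ _ _

theorem pvBMatch_stack_sub (es : List (Int × String)) (s : List Int) (d : PySem.Dict Int Int)
    (x : Int) (hx : x ∈ (pvBMatch es s d).1) : x ∈ s ∨ x ∈ es.map Prod.fst := by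
  induction es generalizing s d with
  | nil => simp only [pvBMatch] at hx; exact Or.inl hx
  | cons e rest ih =>
    obtain ⟨idx, t⟩ := e
    simp only [pvBMatch] at hx
    simp only [List.map_cons, List.mem_cons]
    by_cases h1 : t = "("
    · rw [if_pos h1] at hx
      rcases ih _ _ hx with h | h
      · rcases List.mem_cons.mp h with h | h
        · exact Or.inr (Or.inl h)
        · exact Or.inl h
      · exact Or.inr (Or.inr h)
    · by_cases h2 : t = ")"
      · rw [if_neg h1, if_pos h2] at hx
        cases s with
        | nil => rcases ih _ _ hx with h | h
                 · exact Or.inl h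
                 · exact Or.inr (Or.inr h)
        | cons p s' =>
          rcases ih _ _ hx with h | h
          · exact Or.inl (List.mem_cons_of_mem _ h)
          · exact Or.inr (Or.inr h)
      · rw [if_neg h1, if_neg h2] at hx
        rcases ih _ _ hx with h | h
        · exact Or.inl h
        · exact Or.inr (Or.inr h)

theorem pvBMatch_get_stable (es : List (Int × String)) (s : List Int) (d : PySem.Dict Int Int)
    (p : Int) (hs : p ∉ s) (he : ∀ e ∈ es, e.1 ≠ p) :
    (pvBMatch es s d).2.get? p = d.get? p := by
  induction es generalizing s d with
  | nil => rfl
  | cons e rest ih =>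
    obtain ⟨idx, t⟩ := e
    have hidx : idx ≠ p := he (idx, t) (List.mem_cons_self) 
    have he' : ∀ e ∈ rest, e.1 ≠ p := fun e hm => he e (List.mem_cons_of_mem _ hm)
    simp only [pvBMatch]
    by_cases h1 : t = "("
    · rw [if_pos h1]
      exact ih _ _ (by intro hmem; rcases List.mem_cons.mp hmem with h | h; exacts [hidx h.symm, hs h]) he'
    · by_cases h2 : t = ")"
      · rw [if_neg h1, if_pos h2]
        cases s with
        | nil => exact ih _ _ hs he'
        | cons q s' =>
          have hq : p ≠ q := fun h => hs (h ▸ List.mem_cons_self)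
          rw [ih _ _ (fun h => hs (List.mem_cons_of_mem _ h)) he']
          exact PySem.Dict.get?_insert_of_ne d idx hq
      · rw [if_neg h1, if_neg h2]
        exact ih _ _ hs he'

theorem pvBMatch_group (u : List String) : ∀ (n : Int), 0 < n → (pvAInner u n).2.2 = 0 → ∀
    (k : Int) (g : List Int) (p : Int) (s : List Int) (d : PySem.Dict Int Int),
    g.length + 1 = n.toNat →
    ∃ d', pvBMatch (PySem.List.enumerate u k) (g ++ p :: s) d
        = pvBMatch (PySem.List.enumerate (pvAInner u n).2.1 (k + (pvAInner u n).1.length)) s d'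
      ∧ d'.get? p = some (k + (pvAInner u n).1.length - 1) := by
  induction u with
  | nil =>
    intro n hn h0
    rw [pvAInner_nil] at h0
    simp at h0
    omega
  | cons t rest ih =>
    intro n hn h0 k g p s d hg
    rw [pvAInner_cons hn] at h0 ⊢
    simp only [List.length_cons] at h0 ⊢
    rw [PySem.List.enumerate_cons]
    by_cases h1 : t = "("
    · simp only [if_pos h1] at h0 ⊢
      simp only [pvBMatch, if_pos h1]
      have hcons : (k :: (g ++ p :: s)) = (k :: g) ++ p :: s := rfl
      rw [hcons]
      obtain ⟨d', heq, hget⟩ := ih (n + 1) (by omega) h0 (k + 1) (k :: g) p s d (by simp; omega)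
      refine ⟨d', ?_, ?_⟩
      · rw [heq]
        congr 1
        all_goals (push_cast; ring_nf)
      · rw [hget]
        congr 1
        all_goals (push_cast; ring_nf)
    · by_cases h2 : t = ")"
      · simp only [if_neg h1, if_pos h2] at h0 ⊢
        simp only [pvBMatch, if_neg h1, if_pos h2]
        cases g with
        | nil =>
          have hn1 : n = 1 := by simp at hg; omega
          subst hn1
          rw [pvAInner_nonpos (by omega)] at h0 ⊢
          simp only [List.nil_append, List.length_nil]
          refine ⟨d.insert p k, ?_, ?_⟩
          · congr 1
          · rw [PySem.Dict.get?_insert_self]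
            congr 1
            all_goals (push_cast; ring_nf)
        | cons g0 g' =>
          have hpos : 0 < n - 1 := by simp at hg; omega
          simp only [List.cons_append]
          obtain ⟨d', heq, hget⟩ := ih (n - 1) hpos h0 (k + 1) g' p s (d.insert g0 k) (by simp at hg ⊢; omega)
          refine ⟨d', ?_, ?_⟩
          · rw [heq]
            congr 1
            all_goals (push_cast; ring_nf)
          · rw [hget]
            congr 1
            all_goals (push_cast; ring_nf)
      · simp only [if_neg h1, if_neg h2] at h0 ⊢
        simp only [pvBMatch, if_neg h1, if_neg h2]
        obtain ⟨d', heq, hget⟩ := ih n hn h0 (k + 1) g p s d hg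
        refine ⟨d', ?_, ?_⟩
        · rw [heq]
          congr 1
          all_goals (push_cast; ring_nf)
        · rw [hget]
          congr 1
          all_goals (push_cast; ring_nf)

theorem pvMatch_get (internos rest : List String) (k : Nat)
    (hdrop : internos.drop k = "(" :: rest) (h0 : (pvAInner rest 1).2.2 = 0) :
    (pvBMatch (PySem.List.enumerate internos 0) [] PySem.Dict.empty).2.get? (k : Int)
      = some ((k : Int) + (pvAInner rest 1).1.length) := by
  have hk : k < internos.length := by
    by_contra h
    push Not at h
    rw [List.drop_eq_nil_of_le h] at hdrop
    simp at hdrop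
  have hsplit : internos = internos.take k ++ "(" :: rest := by
    conv_lhs => rw [← List.take_append_drop k internos]
    rw [hdrop]
  have hlen : (internos.take k).length = k := by
    simp [List.length_take]
    omega
  conv_lhs => rw [hsplit, PySem.List.enumerate_append, pvBMatch_append, hlen,
    PySem.List.enumerate_cons]
  set s1 := (pvBMatch (PySem.List.enumerate (internos.take k) 0) [] PySem.Dict.empty).1 with hs1
  set d1 := (pvBMatch (PySem.List.enumerate (internos.take k) 0) [] PySem.Dict.empty).2 with hd1
  simp only [pvBMatch, if_true]
  have hstack : ((0 + (k:Int)) :: s1) = [] ++ ((0 + (k:Int)) :: s1) := rfl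
  rw [hstack]
  obtain ⟨d', heq, hget⟩ := pvBMatch_group rest 1 (by omega) h0
    (0 + (k:Int) + 1) [] (0 + (k:Int)) s1 d1 (by simp)
  rw [heq]
  have hlt : ∀ x ∈ s1, x < (k : Int) := by
    intro x hx
    rcases pvBMatch_stack_sub _ _ _ x hx with h | h
    · simp at h
    · rcases List.mem_map.mp h with ⟨e, he, hfst⟩
      rcases (PySem.List.mem_enumerate_iff _ _ _).mp he with ⟨j, hj, rfl⟩
      rw [hlen] at hj
      simp at hfst ⊢
      omega
  have hget' := hget
  simp only [zero_add] at hget'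
  rw [pvBMatch_get_stable _ s1 d' (k:Int)
    (fun hmem => by have := hlt _ hmem; omega)
    (fun e hmem => by
      rcases (PySem.List.mem_enumerate_iff _ _ _).mp hmem with ⟨j, hj, rfl⟩
      simp
      omega)]
  rw [hget']
  congr 1
  ring

theorem pvWalk_eq (fuel : Nat) : ∀ (internos u : List String) (k : Nat),
    internos.drop k = u → pvClampDepth u = 0 → u.length ≤ fuel →
    pvBWalk internos (pvBMatch (PySem.List.enumerate internos 0) [] PySem.Dict.empty).2 fuel (k : Int)
      = pvAMain u := by
  induction fuel with
  | zero =>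
    intro internos u k hdrop hcl hlen
    rw [List.length_eq_zero_iff.mp (Nat.le_zero.mp hlen)]
    simp [pvBWalk, pvAMain]
  | succ fuel ih =>
    intro internos u k hdrop hcl hlen
    cases u with
    | nil =>
      have hk : internos.length ≤ k := List.drop_eq_nil_iff.mp hdrop
      simp only [pvBWalk]
      rw [if_neg (by exact_mod_cast Nat.not_lt.mpr hk)]
      simp [pvAMain]
    | cons t rest =>
      have hk : k < internos.length := by
        by_contra h
        push Not at h
        rw [List.drop_eq_nil_of_le h] at hdrop
        simp at hdrop
      have hget : PySem.List.pyGet? internos (k : Int) = some t := by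
        rw [PySem.List.pyGet?_natCast, ← Nat.add_zero k, ← List.getElem?_drop, hdrop]
        rfl
      have hklt : (k : Int) < internos.length := by exact_mod_cast hk
      simp only [pvBWalk, hget, if_pos hklt]
      by_cases h1 : t = "("
      · subst h1
        rw [if_pos rfl]
        obtain ⟨hsplit, hcase⟩ := pvAInner_split rest 1 (by omega)
        have hcl1 : List.foldl pvStep 1 rest = 0 := by
          have : pvStep 0 "(" = 1 := by simp [pvStep]
          simpa [pvClampDepth, this] using hcl
        have h0 : (pvAInner rest 1).2.2 = 0 ∧ List.foldl pvStep 1 (pvAInner rest 1).1 = 0 := by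
          rcases hcase with ⟨h0, hf⟩ | ⟨hr, hpos, hf⟩
          · exact ⟨h0, by simpa using hf⟩
          · simp only [Int.toNat_one] at hf
            rw [hcl1] at hf
            omega
        simp only [pvMatch_get internos rest k hdrop h0.1]
        set c := (pvAInner rest 1).1 with hc
        set r := (pvAInner rest 1).2.1 with hr
        -- the slice is the whole group
        have hslice : PySem.List.slice internos (some (k : Int)) (some ((k : Int) + c.length + 1))
            = "(" :: c := by
          have hcast : ((k : Int) + c.length + 1) = ((k + c.length + 1 : Nat) : Int) := by push_cast; ring
          rw [hcast, PySem.List.slice_natCast]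
          rw [hdrop]
          have : k + c.length + 1 - k = c.length + 1 := by omega
          rw [this]
          rw [hsplit]
          rw [← List.cons_append]
          exact List.take_left' (by simp)
        rw [hslice]
        -- A's side
        conv_rhs => rw [pvAMain]
        rw [if_pos rfl]
        simp only [h0.1, ne_eq, not_true_eq_false, if_false]
        -- recursion
        have hdrop' : internos.drop (k + c.length + 1) = r := by
          have h1 : internos.drop (k + (c.length + 1)) = (internos.drop k).drop (c.length + 1) := by
            rw [List.drop_drop]
          rw [show k + c.length + 1 = k + (c.length + 1) by omega, h1, hdrop, hsplit]
          rw [← List.cons_append]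
          exact List.drop_left' (by simp)
        have hcl' : pvClampDepth r = 0 := by
          have := hcl1
          rw [hsplit, List.foldl_append, h0.2] at this
          exact this
        have hlen' : r.length ≤ fuel := by
          have : rest.length = c.length + r.length := by rw [hsplit]; simp
          simp only [List.length_cons] at hlen
          omega
        have hcast2 : ((k : Int) + c.length + 1) = ((k + c.length + 1 : Nat) : Int) := by push_cast; ring
        rw [hcast2, ih internos r (k + c.length + 1) hdrop' hcl' hlen']
      · rw [if_neg h1]
        have hdrop' : internos.drop (k + 1) = rest := by
          have h2 : (internos.drop k).drop 1 = internos.drop (k + 1) := List.drop_drop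
          rw [hdrop] at h2
          rw [← h2]
          rfl
        have hcl' : pvClampDepth rest = 0 := by
          have hstep : pvStep 0 t = 0 := by
            simp only [pvStep, if_neg h1]
            split <;> rfl
          simpa [pvClampDepth, hstep] using hcl
        have hcast : ((k : Int) + 1) = ((k + 1 : Nat) : Int) := by push_cast; ring
        rw [hcast, ih internos rest (k + 1) hdrop' hcl' (by simpa using hlen)]
        conv_rhs => rw [pvAMain]
        rw [if_neg h1]

-- ===== VERDICT (by name: the statement is the Claim_ definition above) =====
theorem extrair_argumentos_py_spec : Claim_equal_extrair_argumentos_py := by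
  intro tokens hdom hpre
  obtain ⟨hlen, hget0, hget1, hcl⟩ := hpre
  unfold Spec_extrair_argumentos_py extrair_argumentos_py extrair_argumentos_py_alt
  have hguard : ¬(tokens.length < 3 ∨ ¬ (PySem.List.pyGet? tokens 0 = some "(")
      ∨ ¬ (PySem.List.pyGet? tokens (-1) = some ")")) := by
    push Not
    exact ⟨by omega, hget0, hget1⟩
  rw [if_neg hguard, if_neg hguard]
  set internos := PySem.List.slice tokens (some 2) (some (-1)) with hint
  have hstack : (pvBMatch (PySem.List.enumerate internos 0) [] PySem.Dict.empty).1 = [] := by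
    apply List.length_eq_zero_iff.mp
    rw [pvBMatch_stack_len internos 0 [] PySem.Dict.empty]
    exact hcl
  simp only [hstack, ne_eq, not_true_eq_false, if_false]
  have hmain := pvWalk_eq internos.length internos internos 0 (by simp) hcl (le_refl _)
  simpa using hmain.symm
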